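-- pv_equiv track=rewrite | github.com/TommasoBianchi/CFR-Jr | games/goofspiel.py | winner_player
-- ===== SOURCE A (Python) =====
-- def winner_player(round_moves):
--     """
--     Calculate the winner player given the cards that were played in a round.
--     """
--
--     moves_dict = {}
--     for p in range(len(round_moves)):
--         move = round_moves[p]
--         if(move in moves_dict):
--             moves_dict[move].append(p)
--         else:
--             moves_dict[move] = [p]
--
--     single_moves = list(filter(lambda el: len(el[1]) == 1, moves_dict.items()))
--
--     if(len(single_moves) == 0):
--         return -1
--
--     winner = max(single_moves, key = lambda el: el[0])[1][0]
--
--     return winner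
-- ===== SOURCE B (Python) =====
-- def winner_player(round_moves):
--     """
--     Calculate the winner player given the cards that were played in a round.
--     """
--     pairs = sorted(((v, p) for p, v in enumerate(round_moves)),
--                    key=lambda t: t[0], reverse=True)
--     prev = None
--     n = len(pairs)
--     for i in range(n):
--         v, p = pairs[i]
--         nxt = pairs[i + 1][0] if i + 1 < n else None
--         if v != prev and v != nxt:
--             return p
--         prev = v
--     return -1
-- ===== Notes on version B (the rewrite author's own statement) =====
-- stated objective: alternative
-- what changed: Replaces the grouping dict + filter + max-by-key pipeline with a descending sort of (value, player) pairs followed by one adjacent-comparison scan that returns the first player whose value differs from both neighbours.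
import Mathlib
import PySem

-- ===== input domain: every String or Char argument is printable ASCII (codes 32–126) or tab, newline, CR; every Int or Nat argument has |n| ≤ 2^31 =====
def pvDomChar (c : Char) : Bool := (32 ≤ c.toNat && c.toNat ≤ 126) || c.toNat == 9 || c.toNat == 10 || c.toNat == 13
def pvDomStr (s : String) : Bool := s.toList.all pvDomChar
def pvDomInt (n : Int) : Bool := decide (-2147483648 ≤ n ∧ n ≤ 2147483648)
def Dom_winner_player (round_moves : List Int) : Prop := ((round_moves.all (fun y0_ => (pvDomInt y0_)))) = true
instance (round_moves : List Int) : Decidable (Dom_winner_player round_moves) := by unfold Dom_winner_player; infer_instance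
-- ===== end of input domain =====

-- B replaces A's grouping-dict + filter + max-by-key pipeline with a descending sort of
-- (value, player) pairs followed by one adjacent-comparison scan; equal return values, proved below.

-- ===== PORT A =====
-- Port of A. round_moves[p] inside the loop is always in range (p ranges over range(len)), so
-- pyGetD's default is never used; el.2 at the winner line always has length 1 (it passed the
-- filter), so pyGet?'s none branch is unreachable.
def winner_player (round_moves : List Int) : Int :=
  let moves_dict : PySem.Dict Int (List Int) :=
    (PySem.List.pyRange 0 (round_moves.length : Int) 1).foldl
      (fun d p =>
        let move := PySem.List.pyGetD round_moves p 0
        if d.contains move then d.modify move [] (fun l => l ++ [p])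
        else d.insert move [p])
      PySem.Dict.empty
  let single_moves := moves_dict.items.filter (fun el => el.2.length == 1)
  if single_moves.length = 0 then -1
  else
    match PySem.List.max? single_moves (fun el => el.1) with
    | none => -1
    | some el =>
      match PySem.List.pyGet? el.2 0 with
      | some w => w
      | none => -1

-- ===== PORT B =====
-- B's scan loop: prev is the previous value (None at the start), nxt looks one pair ahead.
def wpScan : Option Int → List (Int × Int) → Int
  | _, [] => -1
  | prev, (v, p) :: rest =>
    let nxt := rest.head?.map (fun q => q.1)
    if prev ≠ some v ∧ nxt ≠ some v then p else wpScan (some v) rest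

def winner_player_alt (round_moves : List Int) : Int :=
  let pairs := PySem.List.sorted
    ((PySem.List.enumerate round_moves 0).map (fun q => (q.2, q.1)))
    (fun t => t.1) true
  wpScan none pairs

-- ===== PRECONDITION & SPEC =====
def Spec_winner_player (round_moves : List Int) (out : Int) : Prop := out = winner_player_alt round_moves
instance (round_moves : List Int) (out : Int) : Decidable (Spec_winner_player round_moves out) := by unfold Spec_winner_player; infer_instance

-- ===== CLAIM (what is proved, stated in full; the proofs are below) =====
def Claim_equal_winner_player : Prop := ∀ (round_moves : List Int), Dom_winner_player round_moves → Spec_winner_player round_moves (winner_player round_moves)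

-- ===== LEMMAS AND PROOFS =====

-- Common specification both ports are reduced to: the winner is the first index of the largest
-- value that is played exactly once, or -1 if every value is played at least twice.
def wpUniqs (L : List Int) : List Int :=
  (PySem.List.dedup L).filter (fun v => L.count v == 1)

def wpSpec (L : List Int) : Int :=
  match PySem.List.max? (wpUniqs L) (fun v => v) with
  | none => -1
  | some v => (L.idxOf v : Int)

-- (value, player) pairs in play order
def wpPairs (L : List Int) : List (Int × Int) :=
  (PySem.List.enumerate L 0).map (fun q => (q.2, q.1))

-- indices at which v occurs (the players who played v), as A's dict stores them
def wpGrp (L : List Int) (v : Int) : List Int :=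
  ((wpPairs L).filter (fun r => r.1 == v)).map (fun r => r.2)

theorem wpPairs_mem (L : List Int) (q : Int × Int) :
    q ∈ wpPairs L ↔ ∃ (k : Nat) (h : k < L.length), q = (L[k], (k : Int)) := by
  unfold wpPairs
  simp only [List.mem_map, PySem.List.mem_enumerate_iff]
  constructor
  · rintro ⟨r, ⟨k, hk, rfl⟩, rfl⟩; exact ⟨k, hk, by simp⟩
  · rintro ⟨k, hk, rfl⟩; exact ⟨((k : Int), L[k]), ⟨k, hk, by simp⟩, rfl⟩

theorem wpGrp_aux_len (L : List Int) (v : Int) : ∀ (s : Int),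
    ((((PySem.List.enumerate L s).map (fun q => (q.2, q.1))).filter (fun r => r.1 == v)).map (fun r => r.2)).length = L.count v := by
  induction L with
  | nil => intro s; simp [PySem.List.enumerate_nil]
  | cons x t ih =>
    intro s
    rw [PySem.List.enumerate_cons]
    by_cases hx : x = v
    · subst hx; simp [ih]
    · simp [hx, ih]

theorem wpGrp_length (L : List Int) (v : Int) : (wpGrp L v).length = L.count v := by
  unfold wpGrp wpPairs; exact wpGrp_aux_len L v 0

theorem wpGrp_aux_one (L : List Int) (v : Int) : ∀ (s : Int), L.count v = 1 →
    (((PySem.List.enumerate L s).map (fun q => (q.2, q.1))).filter (fun r => r.1 == v)).map (fun r => r.2) = [s + (L.idxOf v : Int)] := by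
  induction L with
  | nil => intro s h; simp at h
  | cons x t ih =>
    intro s h
    rw [PySem.List.enumerate_cons]
    by_cases hx : x = v
    · subst hx
      have ht : t.count x = 0 := by simp at h; omega
      have h0 : (((PySem.List.enumerate t (s+1)).map (fun q => (q.2, q.1))).filter (fun r => r.1 == x)).map (fun r => r.2) = [] := by
        have := wpGrp_aux_len t x (s+1)
        rw [ht] at this
        exact List.eq_nil_of_length_eq_zero this
      simp [h0, List.idxOf_cons_self]
    · have ht : t.count v = 1 := by simp [hx] at h; omega
      have : (x :: t).idxOf v = t.idxOf v + 1 := by simp [hx]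
      rw [this]
      simp only [List.map_cons, List.filter_cons]
      have hb : ((x, s).1 == v) = false := by simp [hx]
      rw [hb]
      simp only [Bool.false_eq_true, if_false, ih (s+1) ht]
      congr 1
      push_cast; ring

theorem wpGrp_of_count_one (L : List Int) (v : Int) (h : L.count v = 1) :
    wpGrp L v = [(L.idxOf v : Int)] := by
  unfold wpGrp wpPairs
  simpa using wpGrp_aux_one L v 0 h

theorem idxOf_of_count_one (L : List Int) (v : Int) : ∀ (j : Nat) (hj : j < L.length),
    L[j] = v → L.count v = 1 → L.idxOf v = j := by
  induction L with
  | nil => intro j hj; simp at hj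
  | cons x t ih =>
    intro j hj hv hc
    cases j with
    | zero => simp at hv; simp [hv, List.idxOf_cons_self]
    | succ k =>
      simp only [List.getElem_cons_succ] at hv
      have hkt : k < t.length := by simpa using hj
      have hmem : v ∈ t := hv ▸ List.getElem_mem hkt
      have hx : x ≠ v := by
        intro hxv
        have := List.count_pos_iff.mpr hmem
        simp [hxv] at hc
        omega
      have ht : t.count v = 1 := by simp [hx] at hc; omega
      simp [hx, ih k hkt hv ht]

theorem max?_map_aux (l : List Int) (f : Int → Int × List Int) (hf : ∀ v, (f v).1 = v) :
    ∀ (acc : Option Int),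
    (l.map f).foldl (fun acc x => match acc with
      | none => some x
      | some m => if m.1 < x.1 then some x else some m) (acc.map f)
    = (l.foldl (fun acc x => match acc with
      | none => some x
      | some m => if m < x then some x else some m) acc).map f := by
  induction l with
  | nil => intro acc; simp
  | cons y t ih =>
    intro acc
    simp only [List.map_cons, List.foldl_cons]
    cases acc with
    | none => exact ih (some y)
    | some m =>
      simp only [Option.map_some, hf]
      by_cases h : m < y
      · simp only [h, if_true]; exact ih (some y)
      · simp only [h, if_false]; exact ih (some m)

theorem max?_map_fst (l : List Int) (f : Int → Int × List Int) (hf : ∀ v, (f v).1 = v) :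
    PySem.List.max? (l.map f) (fun el => el.1) = (PySem.List.max? l (fun v => v)).map f := by
  have h := max?_map_aux l f hf none
  unfold PySem.List.max?
  convert h using 2
  · funext acc x
    cases acc with
    | none => rfl
    | some m => simp
  · congr 1
    funext acc x
    cases acc with
    | none => rfl
    | some m => simp

theorem winner_player_eq_spec (L : List Int) : winner_player L = wpSpec L := by
  unfold winner_player
  have hfold : (PySem.List.pyRange 0 (L.length : Int) 1).foldl
      (fun d p =>
        let move := PySem.List.pyGetD L p 0
        if d.contains move then d.modify move [] (fun l => l ++ [p])
        else d.insert move [p])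
      PySem.Dict.empty
      = (wpPairs L).foldl (fun d r => d.modify r.1 [] (fun l => l ++ [r.2])) PySem.Dict.empty := by
    unfold wpPairs
    rw [PySem.List.enumerate_eq_map_pyRange L 0, List.map_map, List.foldl_map]
    have hlen : PySem.List.len L = (L.length : Int) := by simp [PySem.List.len]
    rw [hlen]
    congr 1
    funext d p
    by_cases h : d.contains (PySem.List.pyGetD L p 0)
    · simp [h]
    · simp only [h, Bool.false_eq_true, if_false, Function.comp]
      simp [PySem.Dict.modify, PySem.Dict.getD_of_not_contains _ _ (by simpa using h)]
  rw [hfold]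
  set d := (wpPairs L).foldl (fun d r => d.modify r.1 [] (fun l => l ++ [r.2])) PySem.Dict.empty with hd
  have hkeys : d.keys = PySem.List.dedup L := by
    rw [hd, PySem.Dict.keys_foldl_modify_key (wpPairs L) (fun r => r.1) [] (fun _ r => (fun l => l ++ [r.2])) PySem.Dict.empty]
    have : (wpPairs L).map (fun r => r.1) = L := by
      unfold wpPairs
      rw [List.map_map]
      exact PySem.List.map_snd_enumerate L 0
    rw [PySem.Dict.keys_empty, this, PySem.Set.update_nil_left, PySem.List.dedup_eq_ofList]
  have hnodup : d.keys.Nodup := by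
    rw [hd]
    exact PySem.Dict.nodup_keys_foldl_modify_key (wpPairs L) (fun r => r.1) [] (fun _ r => (fun l => l ++ [r.2])) PySem.Dict.empty PySem.Dict.nodup_keys_empty
  have hgetD : ∀ v, d.getD v [] = wpGrp L v := by
    intro v
    rw [hd, PySem.Dict.getD_foldl_modify_append (wpPairs L) PySem.Dict.empty v]
    simp [wpGrp, PySem.Dict.getD_empty]
  have hitems : d.items = (PySem.List.dedup L).map (fun v => (v, wpGrp L v)) := by
    rw [PySem.Dict.items_eq_map_keys d hnodup [], hkeys]
    exact List.map_congr_left (fun v _ => by rw [hgetD v])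
  have hsingle : d.items.filter (fun el => el.2.length == 1)
      = (wpUniqs L).map (fun v => (v, wpGrp L v)) := by
    rw [hitems, List.filter_map]
    congr 1
    unfold wpUniqs
    apply List.filter_congr
    intro v _
    simp [Function.comp, wpGrp_length]
  dsimp only
  rw [hsingle]
  by_cases hU : wpUniqs L = []
  · simp [hU, wpSpec, hU ▸ (PySem.List.max?_eq_none_iff (wpUniqs L) (fun v => v)).mpr hU]
  · have hlen0 : ((wpUniqs L).map (fun v => (v, wpGrp L v))).length ≠ 0 := by
      rw [List.length_map]
      exact fun h => hU (List.length_eq_zero_iff.mp h)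
    rw [if_neg hlen0]
    rw [max?_map_fst (wpUniqs L) (fun v => (v, wpGrp L v)) (fun v => rfl)]
    obtain ⟨v, hv⟩ : ∃ v, PySem.List.max? (wpUniqs L) (fun v => v) = some v := by
      cases h : PySem.List.max? (wpUniqs L) (fun v => v) with
      | none => exact absurd ((PySem.List.max?_eq_none_iff _ _).mp h) hU
      | some v => exact ⟨v, rfl⟩
    have hvmem : v ∈ wpUniqs L := PySem.List.max?_mem hv
    have hvcount : L.count v = 1 := by
      have hm := hvmem
      unfold wpUniqs at hm
      rw [List.mem_filter] at hm
      simpa using hm.2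
    rw [hv]
    simp only [Option.map_some]
    rw [wpGrp_of_count_one L v hvcount]
    simp [wpSpec, hv, PySem.List.pyGet?, PySem.List.pyIdx?]

def wpPick : List (Int × Int) → List Int → Int
  | [], _ => -1
  | (v, p) :: t, F => if F.count v = 1 then p else wpPick t F

theorem wpPick_congr : ∀ (t : List (Int × Int)) (F F' : List Int),
    (∀ q ∈ t, (F.count q.1 = 1 ↔ F'.count q.1 = 1)) → wpPick t F = wpPick t F'
  | [], _, _, _ => rfl
  | (v, p) :: t, F, F', h => by
    unfold wpPick
    have hv := h (v, p) (List.mem_cons_self ..)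
    by_cases h1 : F.count v = 1
    · rw [if_pos h1, if_pos (hv.mp h1)]
    · rw [if_neg h1, if_neg (fun h2 => h1 (hv.mpr h2))]
      exact wpPick_congr t F F' (fun q hq => h q (List.mem_cons_of_mem _ hq))

theorem wpScan_eq_pick : ∀ (S : List (Int × Int)) (prev : Option Int),
    S.Pairwise (fun a b => b.1 ≤ a.1) →
    (∀ w, prev = some w → ∀ q ∈ S, q.1 ≤ w) →
    wpScan prev S = wpPick S (prev.toList ++ S.map (fun q => q.1))
  | [], prev, _, _ => rfl
  | (v, p) :: rest, prev, hsort, hprev => by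
    have hhead : ∀ q ∈ rest, q.1 ≤ v := fun q hq => (List.pairwise_cons.mp hsort).1 q hq
    have hrest : rest.Pairwise (fun a b => b.1 ≤ a.1) := (List.pairwise_cons.mp hsort).2
    have h1 : prev.toList.count v = 0 ↔ prev ≠ some v := by
      cases prev with
      | none => simp
      | some w =>
        by_cases hw : w = v
        · subst hw; simp
        · simp [hw]
    have h2 : (rest.map (fun q => q.1)).count v = 0 ↔ (rest.head?.map (fun q => q.1)) ≠ some v := by
      constructor
      · intro h0 hn
        cases rest with
        | nil => simp at hn
        | cons h t =>
          simp only [List.head?_cons, Option.map_some, Option.some_inj] at hn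
          simp [hn] at h0
      · intro hn
        by_contra h0
        have hv : v ∈ rest.map (fun q => q.1) := List.count_pos_iff.mp (Nat.pos_of_ne_zero h0)
        obtain ⟨r, hr, hrv⟩ := List.mem_map.mp hv
        cases rest with
        | nil => simp at hr
        | cons h t =>
          apply hn
          simp only [List.head?_cons, Option.map_some, Option.some_inj]
          rcases List.mem_cons.mp hr with rfl | hrt
          · exact hrv
          · have ha : r.1 ≤ h.1 := (List.pairwise_cons.mp hrest).1 r hrt
            have hb : h.1 ≤ v := hhead h (List.mem_cons_self ..)
            omega
    have hcnt : ((prev.toList ++ ((v, p) :: rest).map (fun q => q.1)).count v = 1)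
        ↔ (prev ≠ some v ∧ (rest.head?.map (fun q => q.1)) ≠ some v) := by
      rw [List.map_cons, List.count_append, List.count_cons_self]
      constructor
      · intro h
        exact ⟨h1.mp (by omega), h2.mp (by omega)⟩
      · rintro ⟨hp, hq⟩
        have := h1.mpr hp
        have := h2.mpr hq
        omega
    show (if prev ≠ some v ∧ (rest.head?.map (fun q => q.1)) ≠ some v then p
          else wpScan (some v) rest) = wpPick ((v, p) :: rest) _
    unfold wpPick
    by_cases hc : prev ≠ some v ∧ (rest.head?.map (fun q => q.1)) ≠ some v
    · rw [if_pos hc, if_pos (hcnt.mpr hc)]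
    · rw [if_neg hc, if_neg (fun h => hc (hcnt.mp h))]
      rw [wpScan_eq_pick rest (some v) hrest (fun w hw q hq => by injection hw with hw; exact hw ▸ hhead q hq)]
      apply wpPick_congr
      intro q hq
      have hF : ∀ x : Int, (prev.toList ++ ((v, p) :: rest).map (fun q => q.1)).count x
          = prev.toList.count x + ((some v : Option Int).toList ++ rest.map (fun q => q.1)).count x := by
        intro x
        simp [List.count_append, List.count_cons]
      rw [hF]
      cases prev with
      | none => simp
      | some w =>
        by_cases hwq : q.1 = w
        · have hvw : v ≤ w := hprev w rfl (v, p) (List.mem_cons_self ..)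
          have hqv : q.1 ≤ v := hhead q hq
          have hvweq : v = w := by omega
          have hmem : v ∈ rest.map (fun r => r.1) := by
            refine List.mem_map.mpr ⟨q, hq, ?_⟩
            omega
          have hge : 1 ≤ (rest.map (fun r => r.1)).count v := List.count_pos_iff.mpr hmem
          have hc2 : 2 ≤ ((some v : Option Int).toList ++ rest.map (fun q => q.1)).count q.1 := by
            have hq1 : q.1 = v := by omega
            rw [hq1, List.count_append]
            have hone : ((some v : Option Int).toList).count v = 1 := by simp
            omega
          constructor
          · intro h; omega
          · intro h; omega
        · have hz : (some w : Option Int).toList.count q.1 = 0 := by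
            rw [List.count_eq_zero]
            simp [hwq]
          omega

theorem wpPick_eq_find? : ∀ (t : List (Int × Int)) (F : List Int),
    wpPick t F = match t.find? (fun q => F.count q.1 == 1) with
      | some q => q.2
      | none => -1
  | [], _ => rfl
  | (v, p) :: t, F => by
    unfold wpPick
    by_cases h : F.count v = 1
    · rw [List.find?_cons_of_pos (h := by simpa using h)]
      simp [h]
    · rw [if_neg h, List.find?_cons_of_neg (h := by simpa using h)]
      exact wpPick_eq_find? t F

theorem wpFind_desc_max (p : Int × Int → Bool) :
    ∀ (l : List (Int × Int)), l.Pairwise (fun a b => b.1 ≤ a.1) →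
    ∀ q, l.find? p = some q → ∀ r ∈ l, p r = true → r.1 ≤ q.1
  | [], _, q, hq => by simp at hq
  | x :: t, hsort, q, hq => by
    intro r hr hpr
    by_cases hx : p x = true
    · rw [List.find?_cons_of_pos (h := hx)] at hq
      injection hq with hq
      subst hq
      rcases List.mem_cons.mp hr with rfl | hrt
      · exact le_refl _
      · exact (List.pairwise_cons.mp hsort).1 r hrt
    · rw [List.find?_cons_of_neg (h := by simpa using hx)] at hq
      rcases List.mem_cons.mp hr with rfl | hrt
      · exact absurd hpr (by simpa using hx)
      · exact wpFind_desc_max p t (List.pairwise_cons.mp hsort).2 q hq r hrt hpr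

theorem winner_player_alt_eq_spec (L : List Int) : winner_player_alt L = wpSpec L := by
  unfold winner_player_alt
  set S := PySem.List.sorted (wpPairs L) (fun t => t.1) true with hS
  have hperm : S.Perm (wpPairs L) := PySem.List.sorted_perm _ _ _
  have hsort : S.Pairwise (fun a b => b.1 ≤ a.1) := PySem.List.sorted_pairwise_rev _ _
  have hscan : wpScan none S = wpPick S (S.map (fun q => q.1)) := by
    have := wpScan_eq_pick S none hsort (fun w hw => by simp at hw)
    simpa using this
  have hcount : ∀ x : Int, (S.map (fun q => q.1)).count x = L.count x := by
    intro x
    have h1 : (S.map (fun q => q.1)).Perm ((wpPairs L).map (fun q => q.1)) := hperm.map _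
    have h2 : (wpPairs L).map (fun q => q.1) = L := by
      unfold wpPairs
      rw [List.map_map]
      exact PySem.List.map_snd_enumerate L 0
    rw [h1.count_eq, h2]
  show wpScan none S = wpSpec L
  rw [hscan, wpPick_eq_find?]
  by_cases hU : wpUniqs L = []
  · have hnone : S.find? (fun q => (S.map (fun q => q.1)).count q.1 == 1) = none := by
      rw [List.find?_eq_none]
      intro q hq
      simp only [beq_iff_eq, hcount]
      intro hc1
      have hqL : q.1 ∈ L := by
        obtain ⟨k, hk, rfl⟩ := (wpPairs_mem L q).mp (hperm.mem_iff.mp hq)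
        exact List.getElem_mem hk
      have : q.1 ∈ wpUniqs L := by
        unfold wpUniqs
        rw [List.mem_filter]
        exact ⟨(PySem.List.mem_dedup _ _).mpr hqL, by simpa using hc1⟩
      rw [hU] at this
      simp at this
    rw [hnone]
    simp [wpSpec, (PySem.List.max?_eq_none_iff _ _).mpr hU]
  · obtain ⟨v, hv⟩ : ∃ v, PySem.List.max? (wpUniqs L) (fun v => v) = some v := by
      cases h : PySem.List.max? (wpUniqs L) (fun v => v) with
      | none => exact absurd ((PySem.List.max?_eq_none_iff _ _).mp h) hU
      | some v => exact ⟨v, rfl⟩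
    have hvmem : v ∈ wpUniqs L := PySem.List.max?_mem hv
    have hvL : v ∈ L ∧ L.count v = 1 := by
      have hm := hvmem
      unfold wpUniqs at hm
      rw [List.mem_filter] at hm
      exact ⟨(PySem.List.mem_dedup _ _).mp hm.1, by simpa using hm.2⟩
    have hidx : ((v, (L.idxOf v : Int)) : Int × Int) ∈ S := by
      rw [hperm.mem_iff, wpPairs_mem]
      refine ⟨L.idxOf v, List.idxOf_lt_length_of_mem hvL.1, ?_⟩
      rw [List.getElem_idxOf]
    have hpred : (fun q : Int × Int => (S.map (fun q => q.1)).count q.1 == 1) (v, (L.idxOf v : Int)) = true := by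
      simp [hcount, hvL.2]
    obtain ⟨q, hq⟩ : ∃ q, S.find? (fun q => (S.map (fun q => q.1)).count q.1 == 1) = some q := by
      cases h : S.find? (fun q => (S.map (fun q => q.1)).count q.1 == 1) with
      | none => exact absurd hpred (by simpa using List.find?_eq_none.mp h _ hidx)
      | some q => exact ⟨q, rfl⟩
    have hqmem : q ∈ S := List.mem_of_find?_eq_some hq
    have hqpred := List.find?_some hq
    have hqc : L.count q.1 = 1 := by
      simpa [hcount] using hqpred
    obtain ⟨k, hk, hqe⟩ := (wpPairs_mem L q).mp (hperm.mem_iff.mp hqmem)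
    have hq1L : q.1 ∈ L := by rw [hqe]; exact List.getElem_mem hk
    have hq1U : q.1 ∈ wpUniqs L := by
      unfold wpUniqs
      rw [List.mem_filter]
      exact ⟨(PySem.List.mem_dedup _ _).mpr hq1L, by simpa using hqc⟩
    have hle1 : q.1 ≤ v := PySem.List.max?_isMax hv q.1 hq1U
    have hle2 : v ≤ q.1 := wpFind_desc_max _ S hsort q hq _ hidx hpred
    have hq1v : q.1 = v := le_antisymm hle1 hle2
    have hkidx : L.idxOf v = k := by
      apply idxOf_of_count_one L v k hk
      · have : q.1 = L[k] := by rw [hqe]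
        omega
      · rw [← hq1v]; exact hqc
    rw [hq]
    simp only [wpSpec, hv]
    rw [hqe, hkidx]

-- ===== VERDICT (by name: the statement is the Claim_ definition above) =====
theorem winner_player_spec : Claim_equal_winner_player := by
  intro L _
  unfold Spec_winner_player
  rw [winner_player_eq_spec, winner_player_alt_eq_spec]
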